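-- pv_equiv track=rewrite | github.com/long12711/enterprise_report_system | comprehensive_analysis_generator.py | _format_distribution
-- ===== SOURCE A (Python) =====
-- def _format_distribution(dist_dict):
--     """��式化分布描述"""
--     items = sorted(dist_dict.items(), key=lambda x: x[1], reverse=True)
--     if len(items) == 0:
--         return "数据不足"
--     elif len(items) == 1:
--         return f"{items[0][0]}{items[0][1]}家"
--     elif len(items) == 2:
--         return f"{items[0][0]}{items[0][1]}家、{items[1][0]}{items[1][1]}家"
--     else:
--         main_types = f"{items[0][0]}{items[0][1]}家、{items[1][0]}{items[1][1]}家"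
--         others = sum(count for _, count in items[2:])
--         return f"{main_types}、其他类型{others}家"
-- ===== SOURCE B (Python) =====
-- def _format_distribution(dist_dict):
--     """One pass: track the two largest (key,count) pairs and the running total instead of sorting."""
--     best = None
--     second = None
--     total = 0
--     for key, count in dist_dict.items():
--         total += count
--         if best is None or count > best[1]:
--             second = best
--             best = (key, count)
--         elif second is None or count > second[1]:
--             second = (key, count)
--     if best is None:
--         return "数据不足"
--     if second is None:
--         return f"{best[0]}{best[1]}家"
--     main = f"{best[0]}{best[1]}家、{second[0]}{second[1]}家"
--     if len(dist_dict) == 2: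
--         return main
--     return f"{main}、其他类型{total - best[1] - second[1]}家"
-- ===== Notes on version B (the rewrite author's own statement) =====
-- stated objective: faster
-- what changed: Replaced the full stable reverse sort with a single pass that maintains the two largest (key,count) pairs (strict > on ties, preserving dict order like the stable sort) and a running total, so the 'others' bucket is total minus the top two.
import Mathlib
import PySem

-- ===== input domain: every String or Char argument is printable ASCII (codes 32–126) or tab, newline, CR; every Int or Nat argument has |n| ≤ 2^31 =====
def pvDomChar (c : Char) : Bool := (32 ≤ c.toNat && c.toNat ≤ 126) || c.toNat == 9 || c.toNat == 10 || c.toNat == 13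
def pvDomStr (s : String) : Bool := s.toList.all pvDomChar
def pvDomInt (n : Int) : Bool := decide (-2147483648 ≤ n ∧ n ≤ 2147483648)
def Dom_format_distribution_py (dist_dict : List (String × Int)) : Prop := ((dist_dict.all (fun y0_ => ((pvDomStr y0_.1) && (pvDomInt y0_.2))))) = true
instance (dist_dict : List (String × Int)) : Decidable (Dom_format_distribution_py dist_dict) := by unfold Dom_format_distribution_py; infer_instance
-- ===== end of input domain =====

-- B replaces the full stable reverse sort by a single pass keeping the two largest pairs and a running total (faster).

-- ===== PORT A =====
-- items = sorted(dist_dict.items(), key=lambda x: x[1], reverse=True); branch on len(items).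
def format_distribution_py (dist_dict : List (String × Int)) : String :=
  match PySem.List.sorted dist_dict (fun x => x.2) true with
  | [] => "数据不足"
  | [(k, c)] => k ++ PySem.Int.toStr c ++ "家"
  | [(k1, c1), (k2, c2)] =>
      k1 ++ PySem.Int.toStr c1 ++ "家、" ++ k2 ++ PySem.Int.toStr c2 ++ "家"
  | (k1, c1) :: (k2, c2) :: rest =>
      let mainTypes := k1 ++ PySem.Int.toStr c1 ++ "家、" ++ k2 ++ PySem.Int.toStr c2 ++ "家"
      let others := (rest.map Prod.snd).sum      -- sum(count for _, count in items[2:])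
      mainTypes ++ "、其他类型" ++ PySem.Int.toStr others ++ "家"

-- ===== PORT B =====
-- state = (best, second, total); 'if best is None or count > best[1]' / 'elif second is None or count > second[1]'
def fdStep (st : Option (String × Int) × Option (String × Int) × Int) (x : String × Int) :
    Option (String × Int) × Option (String × Int) × Int :=
  match st with
  | (best, second, total) =>
    if best.all (fun b => decide (b.2 < x.2)) then (some x, best, total + x.2)
    else if second.all (fun s => decide (s.2 < x.2)) then (best, some x, total + x.2)
    else (best, second, total + x.2)

def format_distribution_py_alt (dist_dict : List (String × Int)) : String :=
  match dist_dict.foldl fdStep (none, none, 0) with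
  | (none, _, _) => "数据不足"
  | (some b, none, _) => b.1 ++ PySem.Int.toStr b.2 ++ "家"
  | (some b, some s, total) =>
      let main := b.1 ++ PySem.Int.toStr b.2 ++ "家、" ++ s.1 ++ PySem.Int.toStr s.2 ++ "家"
      if dist_dict.length == 2 then main
      else main ++ "、其他类型" ++ PySem.Int.toStr (total - b.2 - s.2) ++ "家"

-- ===== PRECONDITION & SPEC =====
def Spec_format_distribution_py (dist_dict : List (String × Int)) (out : String) : Prop := out = format_distribution_py_alt dist_dict
instance (dist_dict : List (String × Int)) (out : String) : Decidable (Spec_format_distribution_py dist_dict out) := by unfold Spec_format_distribution_py; infer_instance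

-- ===== CLAIM (what is proved, stated in full; the proofs are below) =====
def Claim_equal_format_distribution_py : Prop := ∀ (dist_dict : List (String × Int)), Dom_format_distribution_py dist_dict → Spec_format_distribution_py dist_dict (format_distribution_py dist_dict)

-- ===== LEMMAS AND PROOFS =====

-- the insertion step of Python's stable reverse sort (cf. PySem.List.sorted_rev_eq_foldl_insertBy)
def fdIns (acc : List (String × Int)) (x : String × Int) : List (String × Int) :=
  PySem.List.insertBy (fun a b => decide (b.2 < a.2)) x acc

-- one fold step of B matches one insertion step of the sort, at the level of (head?, second?, total)
lemma fdStep_ins (l : List (String × Int)) (t : Int) (x : String × Int) :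
    fdStep (l.head?, l[1]?, t) x = ((fdIns l x).head?, (fdIns l x)[1]?, t + x.2) := by
  match l with
  | [] => simp [fdStep, fdIns, PySem.List.insertBy]
  | [a] =>
      by_cases h : a.2 < x.2 <;>
        simp [fdStep, fdIns, PySem.List.insertBy, h]
  | a :: b :: tl =>
      by_cases h1 : a.2 < x.2
      · simp [fdStep, fdIns, PySem.List.insertBy, h1]
      · by_cases h2 : b.2 < x.2 <;>
          simp [fdStep, fdIns, PySem.List.insertBy, h1, h2]

-- the invariant carried through the whole list
lemma fold_inv (xs : List (String × Int)) (l : List (String × Int)) (t : Int) :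
    xs.foldl fdStep (l.head?, l[1]?, t)
      = ((xs.foldl fdIns l).head?, (xs.foldl fdIns l)[1]?, t + (xs.map Prod.snd).sum) := by
  induction xs generalizing l t with
  | nil => simp
  | cons x xs ih =>
      simp only [List.foldl_cons, fdStep_ins, List.map_cons, List.sum_cons]
      rw [ih]
      ring_nf

-- B's fold computes (head?, second?, total) of the stable reverse sort
lemma fold_eq_sorted (xs : List (String × Int)) :
    xs.foldl fdStep (none, none, 0)
      = ((PySem.List.sorted xs (fun x => x.2) true).head?,
         (PySem.List.sorted xs (fun x => x.2) true)[1]?,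
         (xs.map Prod.snd).sum) := by
  have h := fold_inv xs [] 0
  simpa [PySem.List.sorted_rev_eq_foldl_insertBy, fdIns] using h

-- the sum of counts is invariant under the sort
lemma sum_sorted (xs : List (String × Int)) :
    ((PySem.List.sorted xs (fun x => x.2) true).map Prod.snd).sum = (xs.map Prod.snd).sum :=
  List.Perm.sum_eq (List.Perm.map Prod.snd (PySem.List.sorted_perm xs (fun x => x.2) true))

-- ===== VERDICT (by name: the statement is the Claim_ definition above) =====
theorem format_distribution_py_spec : Claim_equal_format_distribution_py := by
  intro xs _
  unfold Spec_format_distribution_py format_distribution_py format_distribution_py_alt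
  rw [fold_eq_sorted]
  have hlen : (PySem.List.sorted xs (fun x => x.2) true).length = xs.length :=
    PySem.List.length_sorted xs (fun x => x.2) true
  have hsum := sum_sorted xs
  match hs : PySem.List.sorted xs (fun x => x.2) true with
  | [] => simp
  | [(k, c)] => simp
  | [(k1, c1), (k2, c2)] =>
      have : xs.length = 2 := by rw [← hlen, hs]; rfl
      simp [this]
  | (k1, c1) :: (k2, c2) :: (k3, c3) :: rest =>
      have h2 : (xs.length == 2) = false := by rw [← hlen, hs]; simp
      rw [hs] at hsum
      simp only [List.map_cons, List.sum_cons] at hsum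
      have harg : c3 + (rest.map Prod.snd).sum = (xs.map Prod.snd).sum - c1 - c2 := by omega
      simp [h2, harg]
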